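-- pv_equiv track=rewrite | github.com/MrBrantCode/unitest_baseline | mut_generate/mist_train_cf/cf_97396/solution.py | largest_prime_in_string
-- ===== SOURCE A (Python) =====
-- def largest_prime_in_string(s):
--     def is_prime(num):
--         if num < 2:
--             return False
--         for i in range(2, int(num**0.5) + 1):
--             if num % i == 0:
--                 return False
--         return True
--
--     largest_prime = None
--     for char in s:
--         if char.isdigit():
--             num = int(char)
--             if is_prime(num):
--                 if largest_prime is None or num > largest_prime:
--                     largest_prime = num
--     return largest_prime
-- ===== SOURCE B (Python) =====
-- def largest_prime_in_string(s):
--     # The only single-digit primes are 7, 5, 3, 2: probe them in descending order.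
--     for d, v in (("7", 7), ("5", 5), ("3", 3), ("2", 2)):
--         if d in s:
--             return v
--     return None
-- ===== Notes on version B (the rewrite author's own statement) =====
-- stated objective: simpler
-- what changed: Replaced the per-character scan with trial-division primality and a running max by probing the only four single-digit primes 7,5,3,2 in descending order and returning the first one present.
import Mathlib
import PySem

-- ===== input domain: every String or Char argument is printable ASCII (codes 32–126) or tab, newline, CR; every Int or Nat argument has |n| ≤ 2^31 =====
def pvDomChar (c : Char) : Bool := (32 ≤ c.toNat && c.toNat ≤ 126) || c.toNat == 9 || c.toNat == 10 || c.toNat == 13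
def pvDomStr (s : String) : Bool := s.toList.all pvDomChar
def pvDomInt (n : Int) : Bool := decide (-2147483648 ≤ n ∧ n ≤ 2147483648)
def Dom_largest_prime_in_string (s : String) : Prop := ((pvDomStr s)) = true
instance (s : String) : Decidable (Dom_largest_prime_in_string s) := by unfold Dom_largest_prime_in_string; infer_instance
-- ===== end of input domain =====

-- B replaces A's per-character primality test and running max by probing the only four
-- single-digit primes 7,5,3,2 in descending order (objective: simpler).


-- ===== PORT A =====
-- is_prime: trial division up to int(num**0.5); Nat.sqrt is exact for the digit values 0..9 reached here
def pvIsPrimeA (num : Int) : Bool :=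
  if num < 2 then false
  else (PySem.List.pyRange 2 ((Nat.sqrt num.toNat : Int) + 1) 1).all
    (fun i => !(PySem.Int.mod num i == 0))

-- one iteration of A's loop body (int(char) on an ASCII digit is its code minus 48, exact here)
def pvStepA (acc : Option Int) (c : Char) : Option Int :=
  if PySem.Chars.isdigit c then
    let num : Int := (c.toNat : Int) - 48
    if pvIsPrimeA num then
      match acc with
      | none => some num
      | some m => if num > m then some num else acc
    else acc
  else acc

def largest_prime_in_string (s : String) : Option Int :=
  s.toList.foldl pvStepA none

-- ===== PORT B =====
def pvAltGo : List (Char × Int) → List Char → Option Int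
  | [], _ => none
  | (d, v) :: rest, cs => if PySem.Chars.isIn [d] cs then some v else pvAltGo rest cs

def largest_prime_in_string_alt (s : String) : Option Int :=
  pvAltGo [('7', 7), ('5', 5), ('3', 3), ('2', 2)] s.toList

-- ===== PRECONDITION & SPEC =====
def Spec_largest_prime_in_string (s : String) (out : Option Int) : Prop := out = largest_prime_in_string_alt s
instance (s : String) (out : Option Int) : Decidable (Spec_largest_prime_in_string s out) := by unfold Spec_largest_prime_in_string; infer_instance

-- ===== CLAIM (what is proved, stated in full; the proofs are below) =====
def Claim_equal_largest_prime_in_string : Prop := ∀ (s : String), Dom_largest_prime_in_string s → Spec_largest_prime_in_string s (largest_prime_in_string s)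

-- ===== LEMMAS AND PROOFS =====

-- the prime value a single character contributes, if any
def pvPrimeOf (c : Char) : Option Int :=
  if c = '7' then some 7 else if c = '5' then some 5
  else if c = '3' then some 3 else if c = '2' then some 2 else none

-- A's running-max combination
def pvOMax : Option Int → Option Int → Option Int
  | a, none => a
  | none, some v => some v
  | some m, some v => if v > m then some v else some m

-- the membership characterisation both programs compute
def pvR (cs : List Char) : Option Int :=
  if '7' ∈ cs then some 7 else if '5' ∈ cs then some 5
  else if '3' ∈ cs then some 3 else if '2' ∈ cs then some 2 else none

lemma pvIsPrimeA_two : pvIsPrimeA 2 = true := by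
  unfold pvIsPrimeA
  rw [show Nat.sqrt (Int.toNat 2) = 1 from by rw [show Int.toNat 2 = 2 from rfl]; norm_num]
  decide

lemma pvIsPrimeA_three : pvIsPrimeA 3 = true := by
  unfold pvIsPrimeA
  rw [show Nat.sqrt (Int.toNat 3) = 1 from by rw [show Int.toNat 3 = 3 from rfl]; norm_num]
  decide

lemma pvIsPrimeA_four : pvIsPrimeA 4 = false := by
  unfold pvIsPrimeA
  rw [show Nat.sqrt (Int.toNat 4) = 2 from by rw [show Int.toNat 4 = 4 from rfl]; norm_num]
  decide

lemma pvIsPrimeA_five : pvIsPrimeA 5 = true := by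
  unfold pvIsPrimeA
  rw [show Nat.sqrt (Int.toNat 5) = 2 from by rw [show Int.toNat 5 = 5 from rfl]; norm_num]
  decide

lemma pvIsPrimeA_six : pvIsPrimeA 6 = false := by
  unfold pvIsPrimeA
  rw [show Nat.sqrt (Int.toNat 6) = 2 from by rw [show Int.toNat 6 = 6 from rfl]; norm_num]
  decide

lemma pvIsPrimeA_seven : pvIsPrimeA 7 = true := by
  unfold pvIsPrimeA
  rw [show Nat.sqrt (Int.toNat 7) = 2 from by rw [show Int.toNat 7 = 7 from rfl]; norm_num]
  decide

lemma pvIsPrimeA_eight : pvIsPrimeA 8 = false := by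
  unfold pvIsPrimeA
  rw [show Nat.sqrt (Int.toNat 8) = 2 from by rw [show Int.toNat 8 = 8 from rfl]; norm_num]
  decide

lemma pvIsPrimeA_nine : pvIsPrimeA 9 = false := by
  unfold pvIsPrimeA
  rw [show Nat.sqrt (Int.toNat 9) = 3 from by rw [show Int.toNat 9 = 9 from rfl]; norm_num]
  decide

lemma pvIsdigit_iff (c : Char) : PySem.Chars.isdigit c = true ↔ (48 ≤ c.toNat ∧ c.toNat ≤ 57) := by
  simp [PySem.Chars.isdigit, Char.le_def, UInt32.le_iff_toNat_le, Char.toNat_val]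

lemma pvChar_eq_iff (c d : Char) : c = d ↔ c.toNat = d.toNat := by
  constructor
  · intro h; rw [h]
  · intro h; exact Char.ext (UInt32.toNat_inj.mp h)

lemma pvStepA_eq (acc : Option Int) (c : Char) : pvStepA acc c = pvOMax acc (pvPrimeOf c) := by
  by_cases h : PySem.Chars.isdigit c = true
  · obtain ⟨h1, h2⟩ := (pvIsdigit_iff c).mp h
    set n := c.toNat with hn
    interval_cases n <;> cases acc <;>
      simp [pvStepA, h, pvPrimeOf, pvOMax, pvChar_eq_iff, ← hn,
        (by decide : pvIsPrimeA 0 = false), (by decide : pvIsPrimeA 1 = false),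
        pvIsPrimeA_two, pvIsPrimeA_three, pvIsPrimeA_four, pvIsPrimeA_five,
        pvIsPrimeA_six, pvIsPrimeA_seven, pvIsPrimeA_eight, pvIsPrimeA_nine]
  · have hnot : ¬(48 ≤ c.toNat ∧ c.toNat ≤ 57) := fun hc => h ((pvIsdigit_iff c).mpr hc)
    cases acc <;>
      simp [pvStepA, h, pvPrimeOf, pvOMax, pvChar_eq_iff,
        (show c.toNat ≠ 55 by omega), (show c.toNat ≠ 53 by omega),
        (show c.toNat ≠ 51 by omega), (show c.toNat ≠ 50 by omega)]

lemma pvOMax_none_left (b : Option Int) : pvOMax none b = b := by cases b <;> rfl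

lemma pvOMax_none_right (a : Option Int) : pvOMax a none = a := rfl

lemma pvOMax_some_some (m v : Int) : pvOMax (some m) (some v) = some (max m v) := by
  simp only [pvOMax]; split_ifs <;> congr 1 <;> omega

lemma pvOMax_assoc (a b c : Option Int) : pvOMax (pvOMax a b) c = pvOMax a (pvOMax b c) := by
  cases a <;> cases b <;> cases c <;>
    simp only [pvOMax_none_left, pvOMax_none_right, pvOMax_some_some, max_assoc]

lemma pvR_cons (c : Char) (cs : List Char) : pvR (c :: cs) = pvOMax (pvPrimeOf c) (pvR cs) := by
  by_cases h7 : '7' ∈ cs <;> by_cases h5 : '5' ∈ cs <;> by_cases h3 : '3' ∈ cs <;> by_cases h2 : '2' ∈ cs <;>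
    by_cases c7 : c = '7' <;> by_cases c5 : c = '5' <;> by_cases c3 : c = '3' <;> by_cases c2 : c = '2' <;>
      simp_all [pvR, pvPrimeOf, pvOMax] <;>
        simp_all [Ne.symm c7, Ne.symm c5, Ne.symm c3, Ne.symm c2]

lemma pvFoldA (cs : List Char) (acc : Option Int) :
    cs.foldl pvStepA acc = pvOMax acc (pvR cs) := by
  induction cs generalizing acc with
  | nil => simp [pvR, pvOMax]
  | cons c cs ih =>
    rw [List.foldl_cons, ih, pvStepA_eq, pvR_cons, ← pvOMax_assoc]

lemma pvAlt_eq (cs : List Char) :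
    pvAltGo [('7', 7), ('5', 5), ('3', 3), ('2', 2)] cs = pvR cs := by
  by_cases h7 : '7' ∈ cs <;> by_cases h5 : '5' ∈ cs <;> by_cases h3 : '3' ∈ cs <;> by_cases h2 : '2' ∈ cs <;>
    simp_all [pvAltGo, pvR, PySem.Chars.isIn_iff_infix, List.singleton_infix_iff]

-- ===== VERDICT (by name: the statement is the Claim_ definition above) =====
theorem largest_prime_in_string_spec : Claim_equal_largest_prime_in_string := by
  intro s _
  unfold Spec_largest_prime_in_string largest_prime_in_string largest_prime_in_string_alt
  rw [pvFoldA, pvAlt_eq, pvOMax_none_left]
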